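-- pv_equiv track=rewrite | github.com/Logani-bot/omg | phase2_one_click.py | _normalize_header_order
-- ===== SOURCE A (Python) =====
-- from typing import Dict, List, Optional, Tuple
--
-- REQUIRED_COLS = [
--     "date","open","high","low","close",
--     "H","L_now","mode","stage","event",
--     "next_buy_level_name","next_buy_level_price","cutoff_price"
-- ]
--
-- def _normalize_header_order(cols: List[str]) -> List[str]:
--     # REQUIRED_COLS 우선, 그 외는 뒤에 그대로
--     ordered = []
--     seen = set()
--     for c in REQUIRED_COLS:
--         if c in cols:
--             ordered.append(c); seen.add(c)
--     for c in cols: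
--         if c not in seen:
--             ordered.append(c); seen.add(c)
--     return ordered
-- ===== SOURCE B (Python) =====
-- from typing import List
--
-- REQUIRED_COLS = [
--     "date","open","high","low","close",
--     "H","L_now","mode","stage","event",
--     "next_buy_level_name","next_buy_level_price","cutoff_price"
-- ]
--
-- def _key(c: str) -> int:
--     try:
--         return REQUIRED_COLS.index(c)
--     except ValueError:
--         return len(REQUIRED_COLS)
--
-- def _normalize_header_order(cols: List[str]) -> List[str]:
--     # dedupe keeping first occurrence, then stable-sort by REQUIRED_COLS priority
--     return sorted(dict.fromkeys(cols), key=_key)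
-- ===== Notes on version B (the rewrite author's own statement) =====
-- stated objective: idiomatic
-- what changed: Replaces A's two explicit membership-filter loops with a seen-set by deduplicating once (dict.fromkeys) and stably sorting the result under a REQUIRED_COLS-position priority key.
import Mathlib
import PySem

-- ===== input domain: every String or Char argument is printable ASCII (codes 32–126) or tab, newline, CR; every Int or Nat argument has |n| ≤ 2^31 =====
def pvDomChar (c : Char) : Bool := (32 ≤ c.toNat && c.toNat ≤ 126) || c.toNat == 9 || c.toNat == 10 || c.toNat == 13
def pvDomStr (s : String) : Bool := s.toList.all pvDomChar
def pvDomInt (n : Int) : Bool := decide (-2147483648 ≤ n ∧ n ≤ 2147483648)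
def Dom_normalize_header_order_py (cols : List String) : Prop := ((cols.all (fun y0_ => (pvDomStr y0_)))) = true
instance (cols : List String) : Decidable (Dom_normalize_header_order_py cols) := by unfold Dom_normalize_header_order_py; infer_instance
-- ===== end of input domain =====

-- B replaces A's two membership-filter loops by a stable sort of the deduplicated list
-- under a REQUIRED_COLS-position priority key (objective: alternative/idiomatic).

def REQUIRED_COLS : List String :=
  ["date","open","high","low","close",
   "H","L_now","mode","stage","event",
   "next_buy_level_name","next_buy_level_price","cutoff_price"]

-- ===== PORT A =====
def normalize_header_order_py (cols : List String) : List String :=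
  -- ordered = []; seen = set()
  -- for c in REQUIRED_COLS: if c in cols: ordered.append(c); seen.add(c)
  let st1 := REQUIRED_COLS.foldl (fun st c =>
      if c ∈ cols then (st.1 ++ [c], st.2.add c) else st)
    (([] : List String), (PySem.Set.empty : PySem.Set String))
  -- for c in cols: if c not in seen: ordered.append(c); seen.add(c)
  let st2 := cols.foldl (fun st c =>
      if ¬ c ∈ st.2 then (st.1 ++ [c], st.2.add c) else st) st1
  st2.1

-- ===== PORT B =====
-- helper _key of Source B: REQUIRED_COLS.index(c), or len(REQUIRED_COLS) on ValueError
def pvKey (c : String) : Int :=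
  match PySem.List.index? REQUIRED_COLS c with
  | some i => (i : Int)
  | none => (REQUIRED_COLS.length : Int)

def normalize_header_order_py_alt (cols : List String) : List String :=
  -- sorted(dict.fromkeys(cols), key=_key)
  PySem.List.sorted (PySem.List.dedup cols) pvKey

-- ===== PRECONDITION & SPEC =====
def Spec_normalize_header_order_py (cols : List String) (out : List String) : Prop := out = normalize_header_order_py_alt cols
instance (cols : List String) (out : List String) : Decidable (Spec_normalize_header_order_py cols out) := by unfold Spec_normalize_header_order_py; infer_instance

-- ===== CLAIM (what is proved, stated in full; the proofs are below) =====
def Claim_equal_normalize_header_order_py : Prop := ∀ (cols : List String), Dom_normalize_header_order_py cols → Spec_normalize_header_order_py cols (normalize_header_order_py cols)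

-- ===== LEMMAS AND PROOFS =====

-- the common normal form both programs compute
def pvTarget (cols : List String) : List String :=
  REQUIRED_COLS.filter (fun c => decide (c ∈ cols)) ++
  (PySem.List.dedup cols).filter (fun c => decide (c ∉ REQUIRED_COLS))

-- dedup-with-initial-seen-set, the shape of A's second loop
def pvFdd (s : PySem.Set String) : List String → List String
  | [] => []
  | c :: cs => if c ∈ s then pvFdd s cs else c :: pvFdd (s.add c) cs

-- ---- generic insertBy facts ----
theorem insertBy_cons_true {α : Type} (bef : α → α → Bool) (x b : α) (bs : List α)
    (h : bef x b = true) : PySem.List.insertBy bef x (b :: bs) = x :: b :: bs := by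
  simp [PySem.List.insertBy, h]

theorem insertBy_front {α : Type} (bef : α → α → Bool) (x : α) (A B : List α)
    (h : ∀ a ∈ A, bef x a = false) :
    PySem.List.insertBy bef x (A ++ B) = A ++ PySem.List.insertBy bef x B := by
  induction A with
  | nil => simp
  | cons a as ih =>
      have ha : bef x a = false := h a (by simp)
      simp [PySem.List.insertBy, ha, ih (fun a h' => h a (by simp [h']))]

-- ---- key facts ----
theorem index?_shift (l t : List String) (b : String) (h : b ∉ l) :
    PySem.List.index? (l ++ t) b = (PySem.List.index? t b).map (· + l.length) := by
  induction l with
  | nil => simp [Option.map_id']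
  | cons a as ih =>
      have : a ≠ b := by rintro rfl; exact h (by simp)
      rw [List.cons_append, PySem.List.index?_cons_of_ne _ this,
        ih (fun h' => h (by simp [h']))]
      rcases PySem.List.index? t b with _ | k
      · simp
      · simp
        omega

theorem pvKey_lt_of_mem (a : String) (h : a ∈ REQUIRED_COLS) : pvKey a < 13 := by
  rcases (PySem.List.index?_isSome_iff REQUIRED_COLS a).2 h with h'
  rcases h2 : PySem.List.index? REQUIRED_COLS a with _ | k
  · rw [h2] at h'; simp at h'
  · rcases (PySem.List.index?_eq_some_iff _ _ _).1 h2 with ⟨pre, suf, he, hl, -⟩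
    have : REQUIRED_COLS.length = pre.length + 1 + suf.length := by
      rw [he]; simp; omega
    simp only [pvKey, h2]
    have h13 : REQUIRED_COLS.length = 13 := by decide
    omega

theorem pvKey_of_not_mem (a : String) (h : a ∉ REQUIRED_COLS) : pvKey a = 13 := by
  simp only [pvKey, (PySem.List.index?_eq_none_iff _ _).2 h]
  decide

theorem pvKey_le (a : String) : pvKey a ≤ 13 := by
  by_cases h : a ∈ REQUIRED_COLS
  · exact le_of_lt (pvKey_lt_of_mem a h)
  · exact le_of_eq (pvKey_of_not_mem a h)

-- ---- B side: the insertion-sort fold computes pvTarget ----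
theorem foldlIns_eq (d : List String) (hd : d.Nodup) :
    d.foldl (fun acc x => PySem.List.insertBy (fun a b => decide (pvKey a < pvKey b)) x acc) [] =
    REQUIRED_COLS.filter (fun c => decide (c ∈ d)) ++
      d.filter (fun c => decide (c ∉ REQUIRED_COLS)) := by
  induction d using List.reverseRecOn with
  | nil => simp
  | append_singleton d x ih =>
      have hnd : d.Nodup := (List.nodup_append.1 hd).1
      have hxd : x ∉ d := by
        intro hx
        rcases List.nodup_append.1 hd with ⟨-, -, hdisj⟩
        exact hdisj x hx x (by simp) rfl
      rw [List.foldl_append, List.foldl_cons, List.foldl_nil, ih hnd]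
      by_cases hxr : x ∈ REQUIRED_COLS
      · -- x is required: it is inserted at its REQUIRED_COLS position
        rcases List.append_of_mem hxr with ⟨pre, suf, he⟩
        have hreqnd : REQUIRED_COLS.Nodup := by decide
        have hxpre : x ∉ pre := by
          rw [he] at hreqnd
          rcases List.nodup_append.1 hreqnd with ⟨-, -, hdisj⟩
          intro hx; exact hdisj x hx x (by simp) rfl
        have hxsuf : x ∉ suf := by
          rw [he] at hreqnd
          have := (List.nodup_append.1 hreqnd).2.1
          exact (List.nodup_cons.1 this).1
        have hkx : pvKey x = (pre.length : Int) := by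
          have : PySem.List.index? REQUIRED_COLS x = some pre.length :=
            (PySem.List.index?_eq_some_iff _ _ _).2 ⟨pre, suf, he, rfl, hxpre⟩
          simp only [pvKey, this]
        have hprelt : (pre.length : Int) < 13 := by
          have : REQUIRED_COLS.length = pre.length + 1 + suf.length := by
            rw [he]; simp; omega
          have h13 : REQUIRED_COLS.length = 13 := by decide
          omega
        -- split the accumulator
        have hsplit : REQUIRED_COLS.filter (fun c => decide (c ∈ d)) =
            pre.filter (fun c => decide (c ∈ d)) ++ suf.filter (fun c => decide (c ∈ d)) := by
          rw [he, List.filter_append, List.filter_cons]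
          simp [hxd]
        -- everything in pre.filter keeps x moving right
        have hfront : ∀ a ∈ pre.filter (fun c => decide (c ∈ d)),
            (decide (pvKey x < pvKey a)) = false := by
          intro a ha
          have hapre : a ∈ pre := List.mem_of_mem_filter ha
          have : PySem.List.index? REQUIRED_COLS a = PySem.List.index? pre a := by
            rw [he]; exact PySem.List.index?_append_of_mem _ hapre
          rcases h2 : PySem.List.index? pre a with _ | k
          · exact absurd ((PySem.List.index?_eq_none_iff _ _).1 h2) (by simp [hapre])
          · rcases (PySem.List.index?_eq_some_iff _ _ _).1 h2 with ⟨p2, s2, he2, hl2, -⟩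
            have hk : k < pre.length := by rw [he2]; simp; omega
            have hka : pvKey a = (k : Int) := by simp only [pvKey, this, h2]
            simp only [hkx, hka, decide_eq_false_iff_not, not_lt]
            exact_mod_cast le_of_lt hk
        -- everything after the insertion point has a strictly larger key
        have hback : ∀ b ∈ suf.filter (fun c => decide (c ∈ d)) ++
            d.filter (fun c => decide (c ∉ REQUIRED_COLS)),
            (decide (pvKey x < pvKey b)) = true := by
          intro b hb
          rcases List.mem_append.1 hb with hb | hb
          · have hbsuf : b ∈ suf := List.mem_of_mem_filter hb
            have hbnp : b ∉ pre ++ [x] := by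
              rw [he] at hreqnd
              intro hbp
              rcases List.mem_append.1 hbp with hbp | hbp
              · rcases List.nodup_append.1 hreqnd with ⟨-, -, hdisj⟩
                exact hdisj b hbp b (by simp [hbsuf]) rfl
              · simp at hbp; subst hbp; exact hxsuf hbsuf
            have hre : REQUIRED_COLS = (pre ++ [x]) ++ suf := by rw [he]; simp
            have := index?_shift (pre ++ [x]) suf b hbnp
            rw [← hre] at this
            rcases h2 : PySem.List.index? suf b with _ | k
            · exact absurd ((PySem.List.index?_eq_none_iff _ _).1 h2) (by simp [hbsuf])
            · rw [h2] at this
              have hkb : pvKey b = (k : Int) + (pre.length + 1) := by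
                simp only [pvKey, this, Option.map_some, List.length_append,
                  List.length_cons, List.length_nil]; push_cast; ring
              simp only [hkx, hkb, decide_eq_true_eq]
              omega
          · have hbnr : b ∉ REQUIRED_COLS := by
              have := List.of_mem_filter hb; simpa using this
            simp only [hkx, pvKey_of_not_mem b hbnr, decide_eq_true_eq]
            omega
        rw [hsplit, List.append_assoc,
          insertBy_front _ _ _ _ hfront]
        have hmid : PySem.List.insertBy (fun a b => decide (pvKey a < pvKey b)) x
            (suf.filter (fun c => decide (c ∈ d)) ++ d.filter (fun c => decide (c ∉ REQUIRED_COLS)))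
            = x :: (suf.filter (fun c => decide (c ∈ d)) ++ d.filter (fun c => decide (c ∉ REQUIRED_COLS))) := by
          rcases hB : suf.filter (fun c => decide (c ∈ d)) ++ d.filter (fun c => decide (c ∉ REQUIRED_COLS)) with _ | ⟨b, bs⟩
          · simp [PySem.List.insertBy]
          · exact insertBy_cons_true _ _ _ _ (hback b (by rw [hB]; simp))
        rw [hmid]
        -- now rewrite the right-hand side
        have hpre' : pre.filter (fun c => decide (c ∈ d ++ [x])) =
            pre.filter (fun c => decide (c ∈ d)) := by
          apply List.filter_congr
          intro a ha
          have : a ≠ x := by rintro rfl; exact hxpre ha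
          simp [this]
        have hsuf' : suf.filter (fun c => decide (c ∈ d ++ [x])) =
            suf.filter (fun c => decide (c ∈ d)) := by
          apply List.filter_congr
          intro a ha
          have : a ≠ x := by rintro rfl; exact hxsuf ha
          simp [this]
        have hnfilt : (d ++ [x]).filter (fun c => decide (c ∉ REQUIRED_COLS)) =
            d.filter (fun c => decide (c ∉ REQUIRED_COLS)) := by
          rw [List.filter_append, List.filter_cons]
          simp [hxr]
        rw [hnfilt, he]
        simp only [List.filter_append, List.filter_cons, hpre', hsuf']
        simp
      · -- x not required: it goes to the very end
        have hall : ∀ y ∈ REQUIRED_COLS.filter (fun c => decide (c ∈ d)) ++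
            d.filter (fun c => decide (c ∉ REQUIRED_COLS)),
            (decide (pvKey x < pvKey y)) = false := by
          intro y _
          have := pvKey_le y
          simp only [pvKey_of_not_mem x hxr, decide_eq_false_iff_not, not_lt]
          omega
        rw [PySem.List.insertBy_of_forall_not_before _ _ _ hall]
        have hrfilt : REQUIRED_COLS.filter (fun c => decide (c ∈ d ++ [x])) =
            REQUIRED_COLS.filter (fun c => decide (c ∈ d)) := by
          apply List.filter_congr
          intro a ha
          have : a ≠ x := by rintro rfl; exact hxr ha
          simp [this]
        rw [hrfilt, List.filter_append, List.filter_cons]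
        simp [hxr]

-- ---- A side ----
theorem loop1_fst (cols : List String) :
    ∀ (req : List String) (st : List String × PySem.Set String),
    (req.foldl (fun st c => if c ∈ cols then (st.1 ++ [c], st.2.add c) else st) st).1 =
      st.1 ++ req.filter (fun c => decide (c ∈ cols)) := by
  intro req
  induction req with
  | nil => intro st; simp
  | cons c cs ih =>
      intro st
      by_cases hc : c ∈ cols
      · simp [hc, ih]
      · simp [hc, ih]

theorem loop1_snd_mem (cols : List String) :
    ∀ (req : List String) (st : List String × PySem.Set String) (y : String),
    (y ∈ (req.foldl (fun st c => if c ∈ cols then (st.1 ++ [c], st.2.add c) else st) st).2 ↔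
      y ∈ st.2 ∨ (y ∈ req ∧ y ∈ cols)) := by
  intro req
  induction req with
  | nil => intro st y; simp
  | cons c cs ih =>
      intro st y
      by_cases hc : c ∈ cols
      · simp only [List.foldl_cons, if_pos hc, ih, PySem.Set.mem_add]
        constructor
        · rintro (⟨h | rfl⟩ | ⟨h1, h2⟩)
          · exact Or.inl h
          · exact Or.inr ⟨by simp, hc⟩
          · exact Or.inr ⟨by simp [h1], h2⟩
        · rintro (h | ⟨h1, h2⟩)
          · exact Or.inl (Or.inl h)
          · rcases List.mem_cons.1 h1 with rfl | h1
            · exact Or.inl (Or.inr rfl)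
            · exact Or.inr ⟨h1, h2⟩
      · simp only [List.foldl_cons, if_neg hc, ih]
        constructor
        · rintro (h | ⟨h1, h2⟩)
          · exact Or.inl h
          · exact Or.inr ⟨by simp [h1], h2⟩
        · rintro (h | ⟨h1, h2⟩)
          · exact Or.inl h
          · rcases List.mem_cons.1 h1 with rfl | h1
            · exact absurd h2 hc
            · exact Or.inr ⟨h1, h2⟩

theorem loop2_fst :
    ∀ (cs : List String) (st : List String × PySem.Set String),
    (cs.foldl (fun st c => if ¬ c ∈ st.2 then (st.1 ++ [c], st.2.add c) else st) st).1 =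
      st.1 ++ pvFdd st.2 cs := by
  intro cs
  induction cs with
  | nil => intro st; simp [pvFdd]
  | cons c cs ih =>
      intro st
      by_cases hc : c ∈ st.2
      · rw [List.foldl_cons, if_neg (by simpa using hc), ih]
        simp [pvFdd, hc]
      · rw [List.foldl_cons, if_pos (by simpa using hc), ih]
        simp [pvFdd, hc]

theorem pvFdd_congr :
    ∀ (cs : List String) (s s' : PySem.Set String),
    (∀ x, x ∈ s ↔ x ∈ s') → pvFdd s cs = pvFdd s' cs := by
  intro cs
  induction cs with
  | nil => intro s s' _; rfl
  | cons c cs ih =>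
      intro s s' h
      by_cases hc : c ∈ s
      · simp [pvFdd, hc, (h c).1 hc, ih s s' h]
      · have hc' : ¬ c ∈ s' := fun h' => hc ((h c).2 h')
        have : ∀ x, x ∈ s.add c ↔ x ∈ s'.add c := by
          intro x; simp [PySem.Set.mem_add, h x]
        rw [show pvFdd s (c :: cs) = c :: pvFdd (s.add c) cs from by simp [pvFdd, hc],
          show pvFdd s' (c :: cs) = c :: pvFdd (s'.add c) cs from by simp [pvFdd, hc'],
          ih _ _ this]

theorem pvFdd_eq_filter_dedup :
    ∀ (cs : List String) (s : PySem.Set String),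
    pvFdd s cs = (PySem.List.dedup cs).filter (fun c => decide (c ∉ s)) := by
  intro cs
  induction cs with
  | nil => intro s; simp [pvFdd, PySem.List.dedup, PySem.Set.ofList]
  | cons c cs ih =>
      intro s
      have hdc : PySem.List.dedup (c :: cs) = c :: (PySem.List.dedup cs).filter (fun y => !(y == c)) := by
        simp only [PySem.List.dedup_eq_ofList, PySem.Set.ofList_cons]
        rfl
      by_cases hc : c ∈ s
      · rw [show pvFdd s (c :: cs) = pvFdd s cs from by simp [pvFdd, hc], ih s, hdc,
          List.filter_cons]
        simp only [hc, not_true_eq_false, decide_false, List.filter_filter]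
        apply List.filter_congr
        intro a _
        by_cases hac : a = c
        · simp [hac, hc]
        · simp [hac]
      · rw [show pvFdd s (c :: cs) = c :: pvFdd (s.add c) cs from by simp [pvFdd, hc], ih,
          hdc, List.filter_cons]
        simp only [hc, not_false_eq_true, decide_true, List.filter_filter]
        congr 1
        apply List.filter_congr
        intro a _
        by_cases hac : a = c
        · simp [hac, PySem.Set.mem_add]
        · simp [hac, PySem.Set.mem_add]

theorem normalize_a_eq_target (cols : List String) :
    normalize_header_order_py cols = pvTarget cols := by
  unfold normalize_header_order_py
  rw [loop2_fst, loop1_fst cols]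
  have hmem : ∀ x, x ∈ (REQUIRED_COLS.foldl
      (fun st c => if c ∈ cols then (st.1 ++ [c], st.2.add c) else st)
      (([] : List String), (PySem.Set.empty : PySem.Set String))).2 ↔
      x ∈ PySem.Set.ofList (REQUIRED_COLS.filter (fun c => decide (c ∈ cols))) := by
    intro x
    rw [loop1_snd_mem cols, PySem.Set.mem_ofList]
    simp [PySem.Set.empty]
  rw [pvFdd_congr cols _ _ hmem, pvFdd_eq_filter_dedup]
  unfold pvTarget
  simp only [List.nil_append]
  congr 1
  apply List.filter_congr
  intro a ha
  have hac : a ∈ cols := (PySem.List.mem_dedup cols a).1 ha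
  by_cases har : a ∈ REQUIRED_COLS
  · simp [PySem.Set.mem_ofList, har, hac]
  · simp [PySem.Set.mem_ofList, har]

theorem normalize_b_eq_target (cols : List String) :
    normalize_header_order_py_alt cols = pvTarget cols := by
  unfold normalize_header_order_py_alt pvTarget
  rw [PySem.List.sorted_eq_foldl_insertBy, foldlIns_eq _ (by
    simp only [PySem.List.dedup_eq_ofList]; exact PySem.Set.nodup_ofList cols)]
  congr 1
  apply List.filter_congr
  intro a _
  simp

-- ===== VERDICT (by name: the statement is the Claim_ definition above) =====
theorem normalize_header_order_py_spec : Claim_equal_normalize_header_order_py := by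
  intro cols _
  unfold Spec_normalize_header_order_py
  rw [normalize_a_eq_target, normalize_b_eq_target]
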